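-- pv_equiv track=rewrite | github.com/ryanramorris16/advent_of_code | 13-1.py | searchRow
-- ===== SOURCE A (Python) =====
-- def searchRow(puzzleRow):
--     #puzzle is a list of strings where each string is a row in the puzzle
--     #reflect has to have something on both sides so pointers start at 1
--     center = 0
--
--     possible = []
--     while center < len(puzzleRow) - 1:
--         match = True
--         for ind in range(0,min((len(puzzleRow) - (center + 1)), center + 1)):
--             if puzzleRow[center - ind] == puzzleRow[center + ind + 1] and match != False:
--                 match = True
--                 point = center
--             else:
--                 match = False
--                 point = None
--         if point is not None:
--             possible.append(point)
--         center += 1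
--
--     return possible
-- ===== SOURCE B (Python) =====
-- def searchRow(puzzleRow):
--     # Maintain the reversed prefix incrementally and compare it to the suffix
--     # with zip (which truncates to the shorter side), instead of index arithmetic.
--     possible = []
--     left = []
--     right = list(puzzleRow)
--     c = 0
--     while len(right) > 1:
--         left = [right[0]] + left
--         right = right[1:]
--         if all(x == y for x, y in zip(left, right)):
--             possible.append(c)
--         c += 1
--     return possible
-- ===== Notes on version B (the rewrite author's own statement) =====
-- stated objective: simpler
-- what changed: B replaces A's index-arithmetic inner loop with a sticky match flag by incrementally maintaining the reversed prefix and comparing it to the suffix with zip, which truncates to the shorter side automatically.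
import Mathlib
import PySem

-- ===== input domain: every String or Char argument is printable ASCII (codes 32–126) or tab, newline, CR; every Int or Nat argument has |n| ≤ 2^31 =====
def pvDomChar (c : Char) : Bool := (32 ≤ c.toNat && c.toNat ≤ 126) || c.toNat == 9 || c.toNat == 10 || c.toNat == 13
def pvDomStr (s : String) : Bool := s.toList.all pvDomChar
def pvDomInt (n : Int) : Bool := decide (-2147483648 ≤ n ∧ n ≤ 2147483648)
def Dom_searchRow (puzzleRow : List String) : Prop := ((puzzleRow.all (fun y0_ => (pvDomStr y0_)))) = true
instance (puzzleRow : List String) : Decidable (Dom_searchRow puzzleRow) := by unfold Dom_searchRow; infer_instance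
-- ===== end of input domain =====

-- B maintains the reversed prefix incrementally and compares it to the suffix with zip,
-- replacing A's index arithmetic and sticky match flag (objective: simpler; same O(n^2) cost).

-- ===== PORT A =====
-- while loop over center = 0 .. len-2; inner for over range(0, min(...)) carrying (match, point);
-- `point` survives across iterations of the while loop, as in the Python.
def searchRow (puzzleRow : List String) : List Int :=
  ((PySem.List.pyRange 0 ((puzzleRow.length : Int) - 1) 1).foldl
    (fun (st : List Int × Option Int) center =>
      let inner := (PySem.List.pyRange 0 (min ((puzzleRow.length : Int) - (center + 1)) (center + 1)) 1).foldl
        (fun (mp : Bool × Option Int) ind =>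
          if (PySem.List.pyGet? puzzleRow (center - ind) == PySem.List.pyGet? puzzleRow (center + ind + 1))
              && (mp.1 != false)
          then (true, some center)
          else (false, (none : Option Int)))
        (true, st.2)
      (match inner.2 with
       | some point => st.1 ++ [point]
       | none => st.1, inner.2))
    ([], none)).1

-- ===== PORT B =====
-- all(x == y for x, y in zip(left, right))
def altZipAll (left right : List String) : Bool :=
  (left.zip right).all (fun p => p.1 == p.2)

-- the while loop: state (possible, left, right, c), one recursive call per iteration
def altGo (possible : List Int) (left right : List String) (c : Int) : List Int :=
  match right with
  | x :: y :: rest =>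
      altGo (if altZipAll (x :: left) (y :: rest) then possible ++ [c] else possible)
        (x :: left) (y :: rest) (c + 1)
  | _ => possible

def searchRow_alt (puzzleRow : List String) : List Int :=
  altGo [] [] puzzleRow 0

-- ===== PRECONDITION & SPEC =====
def Spec_searchRow (puzzleRow : List String) (out : List Int) : Prop := out = searchRow_alt puzzleRow
instance (puzzleRow : List String) (out : List Int) : Decidable (Spec_searchRow puzzleRow out) := by unfold Spec_searchRow; infer_instance

-- ===== CLAIM (what is proved, stated in full; the proofs are below) =====
def Claim_equal_searchRow : Prop := ∀ (puzzleRow : List String), Dom_searchRow puzzleRow → Spec_searchRow puzzleRow (searchRow puzzleRow)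

-- ===== LEMMAS AND PROOFS =====

-- "center c is a perfect reflection point", as A tests it
def condA (l : List String) (c : Int) : Bool :=
  (PySem.List.pyRange 0 (min ((l.length : Int) - (c + 1)) (c + 1)) 1).all
    (fun ind => PySem.List.pyGet? l (c - ind) == PySem.List.pyGet? l (c + ind + 1))

-- accumulator-free version of altGo
def mirrors : List String → List String → Int → List Int
  | left, x :: y :: rest, c =>
      (if altZipAll (x :: left) (y :: rest) then [c] else []) ++ mirrors (x :: left) (y :: rest) (c + 1)
  | _, _, _ => []

lemma altGo_eq_mirrors (right : List String) :
    ∀ (possible : List Int) (left : List String) (c : Int),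
      altGo possible left right c = possible ++ mirrors left right c := by
  induction right with
  | nil => intro possible left c; simp [altGo, mirrors]
  | cons x t ih =>
      intro possible left c
      cases t with
      | nil => simp [altGo, mirrors]
      | cons y rest =>
          simp only [altGo, mirrors, ih]
          by_cases h : altZipAll (x :: left) (y :: rest) = true <;> simp [h]

-- the inner for-loop: sticky match flag
lemma inner_fold (cond : Int → Bool) (c : Int) (L : List Int) :
    ∀ (m0 : Bool) (p0 : Option Int),
      L.foldl (fun (mp : Bool × Option Int) ind =>
          if cond ind && (mp.1 != false) then (true, some c) else (false, (none : Option Int)))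
        (m0, p0)
      = if L.isEmpty then (m0, p0)
        else if m0 && L.all cond then (true, some c) else (false, none) := by
  induction L with
  | nil => intro m0 p0; simp
  | cons a t ih =>
      intro m0 p0
      rw [List.foldl_cons]
      have hstep : (if cond a && ((m0, p0).1 != false) then ((true : Bool), some c) else (false, (none : Option Int)))
          = (m0 && cond a, if m0 && cond a then some c else none) := by
        cases m0 <;> cases h : cond a <;> simp
      rw [hstep, ih]
      cases t <;> cases hm : m0 <;> cases h : cond a <;>
        simp [List.all_cons, h]

-- the outer while-loop collects exactly the centers with condA, for centers with nonempty inner range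
lemma outer_fold (l : List String) (L : List Int)
    (hL : ∀ c ∈ L, 1 ≤ min ((l.length : Int) - (c + 1)) (c + 1)) :
    ∀ (acc : List Int) (pt : Option Int),
      ((L.foldl
        (fun (st : List Int × Option Int) center =>
          let inner := (PySem.List.pyRange 0 (min ((l.length : Int) - (center + 1)) (center + 1)) 1).foldl
            (fun (mp : Bool × Option Int) ind =>
              if (PySem.List.pyGet? l (center - ind) == PySem.List.pyGet? l (center + ind + 1))
                  && (mp.1 != false)
              then (true, some center)
              else (false, (none : Option Int)))
            (true, st.2)
          (match inner.2 with
           | some point => st.1 ++ [point]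
           | none => st.1, inner.2))
        (acc, pt)).1) = acc ++ L.filter (condA l) := by
  induction L with
  | nil => intro acc pt; simp
  | cons c t ih =>
      intro acc pt
      have hc := hL c (by simp)
      have hne : ¬ (PySem.List.pyRange 0 (min ((l.length : Int) - (c + 1)) (c + 1)) 1).isEmpty := by
        rw [List.isEmpty_iff_length_eq_zero, PySem.List.length_pyRange_one]
        omega
      simp only [List.foldl_cons]
      rw [inner_fold]
      simp only [hne, Bool.true_and]
      have ht := fun c hc => hL c (List.mem_cons_of_mem _ hc)
      rcases Bool.eq_false_or_eq_true (condA l c) with h | h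
      · have h' : (PySem.List.pyRange 0 (min ((l.length : Int) - (c + 1)) (c + 1)) 1).all
            (fun ind => PySem.List.pyGet? l (c - ind) == PySem.List.pyGet? l (c + ind + 1)) = true := h
        simp only [h', if_true]
        rw [ih ht]
        rw [List.filter_cons_of_pos h]
        simp
      · have h' : (PySem.List.pyRange 0 (min ((l.length : Int) - (c + 1)) (c + 1)) 1).all
            (fun ind => PySem.List.pyGet? l (c - ind) == PySem.List.pyGet? l (c + ind + 1)) = false := h
        simp only [h', Bool.false_eq_true, if_false]
        rw [ih ht]
        rw [List.filter_cons_of_neg (by simp [h])]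

-- key pointwise fact: A's index test at center k equals B's reversed-prefix/suffix zip test
lemma key_eq (l : List String) (k : Nat) (hk : k + 1 < l.length) :
    altZipAll ((l.take (k + 1)).reverse) (l.drop (k + 1)) = condA l (k : Int) := by
  have hm : min ((l.length : Int) - ((k : Int) + 1)) ((k : Int) + 1)
      = ((min (l.length - (k + 1)) (k + 1) : Nat) : Int) := by
    push_cast; omega
  set m : Nat := min (l.length - (k + 1)) (k + 1) with hmdef
  rw [Bool.eq_iff_iff]
  have hzlen : (((l.take (k + 1)).reverse).zip (l.drop (k + 1))).length = m := by
    simp [List.length_zip, hmdef]; omega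
  constructor
  · intro h
    unfold condA
    rw [hm, PySem.List.pyRange_zero_natCast, List.all_map, List.all_eq_true]
    intro j hj
    rw [List.mem_range] at hj
    have hj1 : j ≤ k := by omega
    have hj2 : k + 1 + j < l.length := by omega
    have e1 : ((k : Int) - (j : Int)) = ((k - j : Nat) : Int) := by omega
    have e2 : ((k : Int) + (j : Int) + 1) = ((k + 1 + j : Nat) : Int) := by push_cast; ring
    simp only [Function.comp, e1, e2, PySem.List.pyGet?_natCast]
    -- reduce B's zip element at index j to the same pair
    unfold altZipAll at h
    rw [List.all_eq_true] at h
    have hjz : j < (((l.take (k + 1)).reverse).zip (l.drop (k + 1))).length := by omega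
    have := h _ (List.getElem_mem hjz)
    rw [List.getElem_zip] at this
    simp only [List.getElem_reverse, List.getElem_take, List.getElem_drop] at this
    have hidx : (l.take (k + 1)).length - 1 - j = k - j := by
      rw [List.length_take]; omega
    simp only [hidx] at this
    have hlt1 : k - j < l.length := by omega
    rw [List.getElem?_eq_getElem hlt1, List.getElem?_eq_getElem hj2]
    simpa using this
  · intro h
    unfold condA at h
    rw [hm, PySem.List.pyRange_zero_natCast, List.all_map, List.all_eq_true] at h
    unfold altZipAll
    rw [List.all_eq_true]
    intro p hp
    rw [List.mem_iff_getElem] at hp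
    obtain ⟨j, hjz, hpj⟩ := hp
    have hjm : j < m := by omega
    have hj1 : j ≤ k := by omega
    have hj2 : k + 1 + j < l.length := by omega
    have := h (j : Nat) (by rw [List.mem_range]; omega)
    have e1 : ((k : Int) - (j : Int)) = ((k - j : Nat) : Int) := by omega
    have e2 : ((k : Int) + (j : Int) + 1) = ((k + 1 + j : Nat) : Int) := by push_cast; ring
    simp only [Function.comp, e1, e2, PySem.List.pyGet?_natCast] at this
    have hlt1 : k - j < l.length := by omega
    rw [List.getElem?_eq_getElem hlt1, List.getElem?_eq_getElem hj2] at this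
    rw [← hpj, List.getElem_zip]
    simp only [List.getElem_reverse, List.getElem_take, List.getElem_drop]
    have hidx : (l.take (k + 1)).length - 1 - j = k - j := by
      rw [List.length_take]; omega
    simp only [hidx]
    simpa using this

-- mirrors over the (reversed-prefix, suffix) split equals A's filtered range of centers
lemma mirrors_eq_filter (l : List String) :
    ∀ (d : Nat) (k : Nat), l.length - k = d → k ≤ l.length →
      mirrors ((l.take k).reverse) (l.drop k) (k : Int)
        = (PySem.List.pyRange (k : Int) ((l.length : Int) - 1) 1).filter (condA l) := by
  intro d
  induction d with
  | zero =>
      intro k hd hk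
      have : l.length = k := by omega
      rw [PySem.List.pyRange_one_eq_nil (by omega)]
      have : l.drop k = [] := by rw [List.drop_eq_nil_iff]; omega
      simp [this, mirrors]
  | succ d ih =>
      intro k hd hk
      by_cases hlast : k + 1 = l.length
      · -- one element left: no step possible
        rw [PySem.List.pyRange_one_eq_nil (by omega)]
        have hdrop : l.drop k = [l[k]] := by
          have h1 : l.drop k = l[k] :: l.drop (k + 1) := List.drop_eq_getElem_cons (by omega)
          have h2 : l.drop (k + 1) = [] := by rw [List.drop_eq_nil_iff]; omega
          rw [h1, h2]
        simp [hdrop, mirrors]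
      · have hk1 : k + 1 < l.length := by omega
        have hdrop : l.drop k = l[k] :: l.drop (k + 1) := List.drop_eq_getElem_cons (by omega)
        have hdrop2 : l.drop (k + 1) = l[k + 1] :: l.drop (k + 2) := List.drop_eq_getElem_cons hk1
        have htake : (l.take (k + 1)).reverse = l[k] :: (l.take k).reverse := by
          rw [List.take_add_one, List.getElem?_eq_getElem (by omega)]
          simp
        have hrec := ih (k + 1) (by omega) (by omega)
        rw [htake, hdrop2] at hrec
        rw [hdrop, hdrop2]
        show (if altZipAll (l[k] :: (l.take k).reverse) (l[k + 1] :: l.drop (k + 2)) then [(k : Int)] else [])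
            ++ mirrors (l[k] :: (l.take k).reverse) (l[k + 1] :: l.drop (k + 2)) ((k : Int) + 1) = _
        have hcast : ((k : Int) + 1) = ((k + 1 : Nat) : Int) := by push_cast; ring
        rw [hcast, hrec, ← htake, ← hdrop2, key_eq l k hk1]
        rw [PySem.List.pyRange_one_cons (by omega : (k : Int) < (l.length : Int) - 1), List.filter_cons]
        rw [hcast]
        rcases Bool.eq_false_or_eq_true (condA l (k : Int)) with h | h <;> simp [h]

-- ===== VERDICT (by name: the statement is the Claim_ definition above) =====
theorem searchRow_spec : Claim_equal_searchRow := by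
  intro l _
  unfold Spec_searchRow searchRow searchRow_alt
  rw [altGo_eq_mirrors]
  have h0 : mirrors [] l 0 = (PySem.List.pyRange 0 ((l.length : Int) - 1) 1).filter (condA l) := by
    have := mirrors_eq_filter l l.length 0 (by omega) (by omega)
    simpa using this
  rw [h0, outer_fold l _ ?_ [] none]
  intro c hc
  rw [PySem.List.mem_pyRange_one] at hc
  omega
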